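-- pv_equiv track=rewrite | github.com/loegnah/algorithm_src | hacking/2024-lg/rev-basic-8.py | calculate_param_1
-- ===== SOURCE A (Python) =====
-- def calculate_param_1(K):
--     param_1 = []
--     for k in K:
--         for i in range(0x200):
--             if k == (i * (-5)) & 0xff:
--                 param_1.append(chr(i))
--                 break
--     return param_1
-- ===== SOURCE B (Python) =====
-- def calculate_param_1(K):
--     table = {}
--     for i in range(256):
--         table[(i * (-5)) & 0xff] = chr(i)
--     param_1 = []
--     for k in K:
--         if k in table:
--             param_1.append(table[k])
--     return param_1
-- ===== Notes on version B (the rewrite author's own statement) =====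
-- stated objective: faster
-- what changed: B precomputes a 256-entry inverse lookup table once and then maps each k by a single dict lookup, instead of A's per-element linear scan over range(0x200).
import Mathlib
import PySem

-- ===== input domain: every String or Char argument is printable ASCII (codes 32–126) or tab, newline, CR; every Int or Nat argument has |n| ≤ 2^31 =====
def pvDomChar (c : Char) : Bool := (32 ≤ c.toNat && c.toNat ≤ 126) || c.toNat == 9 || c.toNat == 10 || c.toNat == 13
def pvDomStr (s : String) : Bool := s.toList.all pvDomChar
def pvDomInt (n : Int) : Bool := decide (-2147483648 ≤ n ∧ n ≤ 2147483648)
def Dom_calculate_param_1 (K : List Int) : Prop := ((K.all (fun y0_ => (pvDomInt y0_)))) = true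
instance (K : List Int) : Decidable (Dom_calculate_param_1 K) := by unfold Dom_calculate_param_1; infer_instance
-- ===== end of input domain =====

-- ===== PORT A =====
-- B precomputes the 256-entry inverse table once and looks each k up, replacing A's per-k linear scan.
-- chr(i): exact for 0 ≤ i < 0xd800 (both programs only apply it to 0 ≤ i < 256)
def pyChr (i : Int) : String := String.ofList [Char.ofNat i.toNat]

def calculate_param_1 (K : List Int) : List String :=
  K.foldl (fun param_1 k =>
    match (PySem.List.pyRange 0 512 1).find?
        (fun i => k == PySem.Int.band (i * (-5)) 255) with
    | some i => param_1 ++ [pyChr i]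
    | none   => param_1) []

-- ===== PORT B =====
def pvTable : PySem.Dict Int String :=
  (PySem.List.pyRange 0 256 1).foldl
    (fun table i => table.insert (PySem.Int.band (i * (-5)) 255) (pyChr i))
    PySem.Dict.empty

def calculate_param_1_alt (K : List Int) : List String :=
  K.foldl (fun param_1 k =>
    match pvTable.get? k with          -- "if k in table: append(table[k])"
    | some v => param_1 ++ [v]
    | none   => param_1) []

-- ===== PRECONDITION & SPEC =====
def Spec_calculate_param_1 (K : List Int) (out : List String) : Prop := out = calculate_param_1_alt K
instance (K : List Int) (out : List String) : Decidable (Spec_calculate_param_1 K out) := by unfold Spec_calculate_param_1; infer_instance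

-- ===== CLAIM (what is proved, stated in full; the proofs are below) =====
def Claim_equal_calculate_param_1 : Prop := ∀ (K : List Int), Dom_calculate_param_1 K → Spec_calculate_param_1 K (calculate_param_1 K)

-- ===== LEMMAS AND PROOFS =====

-- per-element results of the two programs
def innerA (k : Int) : List String :=
  match (PySem.List.pyRange 0 512 1).find?
      (fun i => k == PySem.Int.band (i * (-5)) 255) with
  | some i => [pyChr i]
  | none   => []

def innerB (k : Int) : List String :=
  match pvTable.get? k with
  | some v => [v]
  | none   => []

-- in-range values: checked pointwise
set_option maxRecDepth 100000 in
set_option maxHeartbeats 4000000 in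
lemma inner_eq_small : ∀ n : Fin 256, innerA (n : Int) = innerB (n : Int) := by decide

-- masking with 0xff always lands in [0, 256)
lemma band_mem (a : Int) :
    0 ≤ PySem.Int.band a 255 ∧ PySem.Int.band a 255 < 256 := by
  rw [PySem.Int.band.eq_1]
  split_ifs with h1 h2 h2
  · push_cast
    have h : a.toNat &&& 255 ≤ 255 := Nat.and_le_right
    omega
  · omega
  · omega
  · omega

lemma innerA_out (k : Int) (hk : k < 0 ∨ 256 ≤ k) : innerA k = [] := by
  unfold innerA
  rw [List.find?_eq_none.mpr]
  intro i hi
  have h0 : 0 ≤ i := by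
    have := (PySem.List.mem_pyRange_one (a := 0) (b := 512) (x := i)).mp hi
    omega
  have hb := band_mem (i * (-5))
  simp only [beq_iff_eq]
  omega

lemma get?_foldl_insert_of_ne (f : Int → Int) (g : Int → String) (k : Int)
    (l : List Int) (d : PySem.Dict Int String) (h : ∀ i ∈ l, f i ≠ k) :
    (l.foldl (fun d i => d.insert (f i) (g i)) d).get? k = d.get? k := by
  induction l generalizing d with
  | nil => rfl
  | cons x xs ih =>
    simp only [List.foldl_cons]
    rw [ih _ (fun i hi => h i (List.mem_cons_of_mem _ hi))]
    rw [PySem.Dict.get?_insert_of_ne d (g x) (Ne.symm (h x (List.mem_cons_self ..)))]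

lemma innerB_out (k : Int) (hk : k < 0 ∨ 256 ≤ k) : innerB k = [] := by
  unfold innerB pvTable
  rw [get?_foldl_insert_of_ne]
  · rfl
  · intro i hi
    have hb := band_mem (i * (-5))
    omega

lemma inner_eq (k : Int) : innerA k = innerB k := by
  by_cases h : 0 ≤ k ∧ k < 256
  · have hn : k = ((k.toNat : Nat) : Int) := by omega
    have hlt : k.toNat < 256 := by omega
    rw [hn]
    exact inner_eq_small ⟨k.toNat, hlt⟩
  · rw [innerA_out k (by omega), innerB_out k (by omega)]

lemma foldA (K : List Int) (acc : List String) :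
    K.foldl (fun param_1 k =>
      match (PySem.List.pyRange 0 512 1).find?
          (fun i => k == PySem.Int.band (i * (-5)) 255) with
      | some i => param_1 ++ [pyChr i]
      | none   => param_1) acc = acc ++ K.flatMap innerA := by
  induction K generalizing acc with
  | nil => simp
  | cons x xs ih =>
    simp only [List.foldl_cons, List.flatMap_cons, ih]
    unfold innerA
    cases (PySem.List.pyRange 0 512 1).find?
        (fun i => x == PySem.Int.band (i * (-5)) 255) <;> simp

lemma foldB (K : List Int) (acc : List String) :
    K.foldl (fun param_1 k =>
      match pvTable.get? k with
      | some v => param_1 ++ [v]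
      | none   => param_1) acc = acc ++ K.flatMap innerB := by
  induction K generalizing acc with
  | nil => simp
  | cons x xs ih =>
    simp only [List.foldl_cons, List.flatMap_cons, ih]
    unfold innerB
    cases pvTable.get? x <;> simp

-- ===== VERDICT (by name: the statement is the Claim_ definition above) =====
theorem calculate_param_1_spec : Claim_equal_calculate_param_1 := by
  intro K _
  unfold Spec_calculate_param_1 calculate_param_1 calculate_param_1_alt
  rw [foldA, foldB]
  simp only [List.nil_append]
  exact List.flatMap_congr (fun k _ => inner_eq k)
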